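-- pv_equiv track=rewrite | github.com/anonymous2025abc/Arithmetic_Transformer | data_generation_script/individual_task_scripts/addition/addition_gen.py | decode_idx
-- ===== SOURCE A (Python) =====
-- def decode_idx(idx: int, num_operands: int):
--     """Turn an integer 0 <= idx < 1000**num_operands into num_operands 3-digit numbers.
--     Returns a tuple of length num_operands (each in 0..999)."""
--     if num_operands < 1:
--         raise ValueError("num_operands must be >= 1")
--     parts = []
--     for _ in range(num_operands - 1):
--         parts.append(idx % 1000)
--         idx //= 1000
--     parts.append(idx)  # remaining most-significant part
--     parts.reverse()
--     return tuple(parts)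
-- ===== SOURCE B (Python) =====
-- def decode_idx(idx: int, num_operands: int):
--     """Turn an integer 0 <= idx < 1000**num_operands into num_operands 3-digit numbers.
--     Returns a tuple of length num_operands (each in 0..999)."""
--     if num_operands < 1:
--         raise ValueError("num_operands must be >= 1")
--     parts = [0] * num_operands
--     rem = idx
--     i = num_operands - 1
--     while i >= 2:  # peel two parts per division: one base-1000000 chunk = a digit pair
--         rem, chunk = divmod(rem, 1000000)
--         parts[i] = chunk % 1000
--         parts[i - 1] = chunk // 1000
--         i -= 2
--     if i == 1:
--         rem, parts[1] = divmod(rem, 1000)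
--     parts[0] = rem
--     return tuple(parts)
-- ===== Notes on version B (the rewrite author's own statement) =====
-- stated objective: alternative
-- what changed: B preallocates the output and fills it right-to-left by index, extracting one base-1000000 chunk per division and splitting it into a pair of base-1000 parts (plus one single step when the count is even), instead of A's one-digit-per-division append loop followed by reverse(); Pre_ excludes only num_operands < 1, where A raises ValueError.
import Mathlib
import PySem

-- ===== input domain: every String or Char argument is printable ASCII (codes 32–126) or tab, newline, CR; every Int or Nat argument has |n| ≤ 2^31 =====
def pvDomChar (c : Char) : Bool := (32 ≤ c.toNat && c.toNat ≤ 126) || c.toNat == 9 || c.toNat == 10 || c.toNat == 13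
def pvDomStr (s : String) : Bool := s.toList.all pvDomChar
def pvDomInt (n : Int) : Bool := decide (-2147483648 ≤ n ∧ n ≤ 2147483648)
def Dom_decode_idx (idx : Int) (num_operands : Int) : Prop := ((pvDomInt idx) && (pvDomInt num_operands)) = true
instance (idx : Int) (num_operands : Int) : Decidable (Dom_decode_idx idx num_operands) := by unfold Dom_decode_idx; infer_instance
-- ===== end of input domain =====

-- B preallocates the output and fills it right-to-left, one base-1000000 chunk (= a pair of
-- base-1000 parts) per division, with no append and no final reversal (objective: alternative).

-- ===== PORT A =====
def decode_idx (idx : Int) (num_operands : Int) : List Int :=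
  if num_operands < 1 then []  -- Python raises ValueError here; excluded by Pre_
  else
    let st := (PySem.List.pyRange 0 (num_operands - 1) 1).foldl
      (fun (st : List Int × Int) _ =>
        (st.1 ++ [PySem.Int.mod st.2 1000], PySem.Int.floordiv st.2 1000))
      ([], idx)
    (st.1 ++ [st.2]).reverse

-- ===== PORT B =====
-- Source B's while-loop, two parts per iteration: each step takes divmod(rem, 1000000) and
-- splits the chunk into its high and low base-1000 digit; modelled as recursion on the
-- number of pair iterations, returning (filled suffix in output order, remaining rem).
def bPairs : Nat → Int → List Int × Int
  | 0, r => ([], r)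
  | j+1, r =>
      let chunk := PySem.Int.mod r 1000000
      let t := bPairs j (PySem.Int.floordiv r 1000000)
      (t.1 ++ [PySem.Int.floordiv chunk 1000, PySem.Int.mod chunk 1000], t.2)

def decode_idx_alt (idx : Int) (num_operands : Int) : List Int :=
  if num_operands < 1 then []  -- Source B raises ValueError here; excluded by Pre_
  else
    let k := (num_operands - 1).toNat   -- initial i: number of non-top slots
    let t := bPairs (k / 2) idx
    if k % 2 = 1 then
      -- the trailing single step: rem, parts[1] = divmod(rem, 1000); parts[0] = rem
      PySem.Int.floordiv t.2 1000 :: PySem.Int.mod t.2 1000 :: t.1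
    else t.2 :: t.1

-- ===== PRECONDITION & SPEC =====
-- Pre_ excludes exactly num_operands < 1, where the Python A raises ValueError.
def Pre_decode_idx (idx : Int) (num_operands : Int) : Prop := 1 ≤ num_operands
instance (idx : Int) (num_operands : Int) : Decidable (Pre_decode_idx idx num_operands) := by unfold Pre_decode_idx; infer_instance
def pvWitness_decode_idx : Int × Int := (1234567, 3)

def Spec_decode_idx (idx : Int) (num_operands : Int) (out : List Int) : Prop := out = decode_idx_alt idx num_operands
instance (idx : Int) (num_operands : Int) (out : List Int) : Decidable (Spec_decode_idx idx num_operands out) := by unfold Spec_decode_idx; infer_instance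

-- ===== CLAIM (what is proved, stated in full; the proofs are below) =====
def Claim_equal_decode_idx : Prop := ∀ (idx : Int) (num_operands : Int), Dom_decode_idx idx num_operands → Pre_decode_idx idx num_operands → Spec_decode_idx idx num_operands (decode_idx idx num_operands)

-- ===== LEMMAS AND PROOFS =====

-- LSB-first digit list produced by A's loop (k iterations)
def aDigits : Nat → Int → List Int
  | 0, _ => []
  | k+1, x => PySem.Int.mod x 1000 :: aDigits k (PySem.Int.floordiv x 1000)

-- the remaining value after A's loop (k iterations)
def aRem : Nat → Int → Int
  | 0, x => x
  | k+1, x => aRem k (PySem.Int.floordiv x 1000)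

lemma foldA (l : List Int) : ∀ (ps : List Int) (x : Int),
    l.foldl (fun (st : List Int × Int) _ =>
        (st.1 ++ [PySem.Int.mod st.2 1000], PySem.Int.floordiv st.2 1000)) (ps, x)
      = (ps ++ aDigits l.length x, aRem l.length x) := by
  induction l with
  | nil => intro ps x; simp [aDigits, aRem]
  | cons a l ih =>
      intro ps x
      simp only [List.foldl_cons, List.length_cons, ih, aDigits, aRem, List.append_assoc,
        List.singleton_append]

lemma pow1000_pos (k : Nat) : (0 : Int) < 1000 ^ k := by positivity

-- (x % (a*b)) / a = (x / a) % b for positive a, b (Euclidean div/mod)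
lemma emod_mul_ediv (x a b : Int) (ha : 0 < a) :
    (x % (a * b)) / a = (x / a) % b := by
  have hc : x / a / b = x / (a * b) := Int.ediv_ediv_of_nonneg (le_of_lt ha)
  rw [Int.emod_def x (a * b), Int.emod_def (x / a) b, ← hc]
  have : x - a * b * (x / a / b) = x + a * (-(b * (x / a / b))) := by ring
  rw [this, Int.add_mul_ediv_left _ _ (ne_of_gt ha)]
  ring

-- A's remaining value after k steps is division by 1000^k
lemma aRem_eq (k : Nat) : ∀ x : Int, aRem k x = x / 1000 ^ k := by
  induction k with
  | zero => intro x; simp [aRem]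
  | succ k ih =>
      intro x
      rw [aRem, ih, PySem.Int.floordiv_eq_ediv_of_pos (by norm_num),
        Int.ediv_ediv_of_nonneg (by norm_num : (0:Int) ≤ 1000), pow_succ']

-- MSB-peeling form of A's digit list
lemma aDigits_succ (k : Nat) : ∀ x : Int,
    aDigits (k+1) x = aDigits k x ++ [PySem.Int.mod (aRem k x) 1000] := by
  induction k with
  | zero => intro x; simp [aDigits, aRem]
  | succ k ih =>
      intro x
      rw [show aDigits (k+1+1) x
            = PySem.Int.mod x 1000 :: aDigits (k+1) (PySem.Int.floordiv x 1000) from rfl,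
        ih]
      rfl

-- top-peeling form of A's remaining value
lemma aRem_succ' (k : Nat) (x : Int) :
    aRem (k+1) x = PySem.Int.floordiv (aRem k x) 1000 := by
  rw [aRem_eq, aRem_eq, PySem.Int.floordiv_eq_ediv_of_pos (by norm_num),
    Int.ediv_ediv_of_nonneg (le_of_lt (pow1000_pos k)), pow_succ]

-- B's pair loop computes 2j of A's digits (reversed) and A's remaining value
lemma bPairs_eq (j : Nat) : ∀ x : Int,
    bPairs j x = ((aDigits (2*j) x).reverse, aRem (2*j) x) := by
  induction j with
  | zero => intro x; simp [bPairs, aDigits, aRem]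
  | succ j ih =>
      intro x
      have h1000 : (0:Int) < 1000 := by norm_num
      have hM : (0:Int) < 1000000 := by norm_num
      have hdd : PySem.Int.floordiv (PySem.Int.floordiv x 1000) 1000
          = PySem.Int.floordiv x 1000000 := by
        rw [PySem.Int.floordiv_eq_ediv_of_pos h1000, PySem.Int.floordiv_eq_ediv_of_pos h1000,
          PySem.Int.floordiv_eq_ediv_of_pos hM,
          Int.ediv_ediv_of_nonneg (by norm_num : (0:Int) ≤ 1000)]
        norm_num
      have hlow : PySem.Int.mod (PySem.Int.mod x 1000000) 1000 = PySem.Int.mod x 1000 := by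
        rw [PySem.Int.mod_eq_emod_of_pos h1000, PySem.Int.mod_eq_emod_of_pos h1000,
          PySem.Int.mod_eq_emod_of_pos hM,
          Int.emod_emod_of_dvd x (by norm_num : (1000:Int) ∣ 1000000)]
      have hhigh : PySem.Int.floordiv (PySem.Int.mod x 1000000) 1000
          = PySem.Int.mod (PySem.Int.floordiv x 1000) 1000 := by
        rw [PySem.Int.floordiv_eq_ediv_of_pos h1000, PySem.Int.mod_eq_emod_of_pos hM,
          PySem.Int.mod_eq_emod_of_pos h1000, PySem.Int.floordiv_eq_ediv_of_pos h1000,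
          show (1000000:Int) = 1000 * 1000 by norm_num,
          emod_mul_ediv x 1000 1000 h1000]
      have hsh : 2 * (j + 1) = (2 * j) + 1 + 1 := by ring
      rw [bPairs, ih, hsh, aDigits, aDigits, aRem, aRem, hdd, hlow, hhigh]
      simp

-- ===== VERDICT (by name: the statement is the Claim_ definition above) =====
theorem decode_idx_spec : Claim_equal_decode_idx := by
  unfold Claim_equal_decode_idx Spec_decode_idx Pre_decode_idx
  intro idx n _ hn
  have hlt : ¬ n < 1 := by omega
  unfold decode_idx decode_idx_alt
  rw [if_neg hlt, if_neg hlt]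
  obtain ⟨k, hk⟩ : ∃ k : Nat, n = (k : Int) + 1 := ⟨(n - 1).toNat, by omega⟩
  subst hk
  have h1 : ((k : Int) + 1 - 1) = (k : Int) := by ring
  have h3 : ((k : Int)).toNat = k := by omega
  rw [h1, h3]
  have hA := foldA (PySem.List.pyRange 0 (k : Int) 1) [] idx
  have lenA : (PySem.List.pyRange 0 (k : Int) 1).length = k := by
    rw [PySem.List.length_pyRange_one]; omega
  rw [lenA] at hA
  rw [hA]
  simp only [List.nil_append, List.reverse_append, List.reverse_cons, List.reverse_nil,
    List.singleton_append]
  rcases Nat.even_or_odd k with ⟨j, hj⟩ | ⟨j, hj⟩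
  · subst hj
    have hd2 : (j + j) / 2 = j := by omega
    have hm2 : ¬ (j + j) % 2 = 1 := by omega
    rw [if_neg hm2, hd2, bPairs_eq j idx, two_mul]
  · subst hj
    have hd2 : (2 * j + 1) / 2 = j := by omega
    have hm2 : (2 * j + 1) % 2 = 1 := by omega
    rw [if_pos hm2, hd2, bPairs_eq j idx, aDigits_succ (2*j) idx, aRem_succ' (2*j) idx]
    simp
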